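-- pv_equiv track=rewrite | github.com/ka-reem/perplexity-pitchdeck-generator | app.py | parse_content_into_slides
-- ===== SOURCE A (Python) =====
-- def parse_content_into_slides(content):
--     slides = []
--     current_slide = None
--     current_content = []
--
--     lines = content.split('\n')
--     for line in lines:
--         line = line.strip()
--         if not line:
--             continue
--
--         if line.startswith(('1.', '2.', '3.', '4.', '5.', '6.', '7.', '8.')):
--             if current_slide:
--                 current_slide['content'] = '\n'.join(current_content)
--                 slides.append(current_slide)
--             title = line.split(':', 1)[-1].strip() if ':' in line else line.split('.', 1)[-1].strip()
--             current_slide = {'title': title, 'content': ''}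
--             current_content = []
--         elif current_slide:
--             current_content.append(line)
--
--     if current_slide:
--         current_slide['content'] = '\n'.join(current_content)
--         slides.append(current_slide)
--
--     return slides
-- ===== SOURCE B (Python) =====
-- def _is_title(l):
--     return l.startswith(('1.', '2.', '3.', '4.', '5.', '6.', '7.', '8.'))
--
--
-- def _title_of(l):
--     return (l.split(':', 1)[-1] if ':' in l else l.split('.', 1)[-1]).strip()
--
--
-- def parse_content_into_slides(content):
--     # phase 1: the non-empty stripped lines
--     lines = [s for s in (x.strip() for x in content.split('\n')) if s]
--     # phase 2: drop everything before the first title line, then cut into segments,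
--     # each segment headed by a title line
--     i = 0
--     while i < len(lines) and not _is_title(lines[i]):
--         i += 1
--     slides = []
--     while i < len(lines):
--         j = i + 1
--         while j < len(lines) and not _is_title(lines[j]):
--             j += 1
--         slides.append({'title': _title_of(lines[i]),
--                        'content': '\n'.join(lines[i + 1:j])})
--         i = j
--     return slides
-- ===== Notes on version B (the rewrite author's own statement) =====
-- stated objective: alternative
-- what changed: Replaces A's single pass with an inline current_slide/current_content accumulator by a two-phase shape: first build the list of non-empty stripped lines, then segment it at title lines (dropping any prefix before the first title) and map each segment to a slide dict.
import Mathlib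
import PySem

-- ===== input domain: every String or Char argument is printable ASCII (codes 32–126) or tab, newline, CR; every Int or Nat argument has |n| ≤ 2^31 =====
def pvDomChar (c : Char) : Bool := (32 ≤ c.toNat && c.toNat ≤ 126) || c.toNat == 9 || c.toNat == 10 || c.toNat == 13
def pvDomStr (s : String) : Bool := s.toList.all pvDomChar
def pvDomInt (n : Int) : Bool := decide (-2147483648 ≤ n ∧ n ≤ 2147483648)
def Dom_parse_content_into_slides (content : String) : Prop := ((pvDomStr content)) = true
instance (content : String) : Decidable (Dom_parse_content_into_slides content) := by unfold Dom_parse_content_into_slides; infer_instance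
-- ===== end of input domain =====

-- B restructures A's single accumulator pass as segment-then-build (same cost); equivalence of return values is proved below.

-- ===== PORT A =====
-- literal transliteration of A's loop: state = (slides, current_slide title?, current_content)
def parse_content_into_slides (content : String) : List (List (String × String)) :=
  let lines := (PySem.Str.split? content "\n").getD []
  let st := lines.foldl
    (fun (acc : List (List (String × String)) × Option String × List String) line =>
      let line := PySem.Str.strip line
      if line = "" then acc
      else if (PySem.Str.startswith line "1." || PySem.Str.startswith line "2." ||
               PySem.Str.startswith line "3." || PySem.Str.startswith line "4." ||
               PySem.Str.startswith line "5." || PySem.Str.startswith line "6." ||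
               PySem.Str.startswith line "7." || PySem.Str.startswith line "8.") then
        let slides := match acc.2.1 with
          | some t => acc.1 ++ [[("title", t), ("content", PySem.Str.join "\n" acc.2.2)]]
          | none => acc.1
        let title := if PySem.Str.isIn ":" line then
            PySem.Str.strip (((PySem.Str.splitMax? line ":" 1).getD []).getLastD "")
          else
            PySem.Str.strip (((PySem.Str.splitMax? line "." 1).getD []).getLastD "")
        (slides, some title, [])
      else match acc.2.1 with
        | some _ => (acc.1, acc.2.1, acc.2.2 ++ [line])
        | none => acc)
    ([], none, [])
  match st.2.1 with
  | some t => st.1 ++ [[("title", t), ("content", PySem.Str.join "\n" st.2.2)]]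
  | none => st.1

-- ===== PORT B =====
def pvIsTitle (l : String) : Bool :=
  PySem.Str.startswith l "1." || PySem.Str.startswith l "2." ||
  PySem.Str.startswith l "3." || PySem.Str.startswith l "4." ||
  PySem.Str.startswith l "5." || PySem.Str.startswith l "6." ||
  PySem.Str.startswith l "7." || PySem.Str.startswith l "8."

def pvTitleOf (l : String) : String :=
  if PySem.Str.isIn ":" l then
    PySem.Str.strip (((PySem.Str.splitMax? l ":" 1).getD []).getLastD "")
  else
    PySem.Str.strip (((PySem.Str.splitMax? l "." 1).getD []).getLastD "")

-- the inner scan 'j = i+1; while … not title: j += 1' and the slice lines[i+1:j]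
def pvGroup : List String → List (List (String × String))
  | [] => []
  | h :: t =>
    [("title", pvTitleOf h),
     ("content", PySem.Str.join "\n" (t.takeWhile (fun l => !pvIsTitle l)))]
      :: pvGroup (t.dropWhile (fun l => !pvIsTitle l))
  termination_by ls => ls.length
  decreasing_by
    simpa using Nat.lt_succ_of_le (List.length_dropWhile_le _ _)

def parse_content_into_slides_alt (content : String) : List (List (String × String)) :=
  let lines := (((PySem.Str.split? content "\n").getD []).map PySem.Str.strip).filter (fun l => decide (l ≠ ""))
  pvGroup (lines.dropWhile (fun l => !pvIsTitle l))

-- ===== PRECONDITION & SPEC =====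
def Spec_parse_content_into_slides (content : String) (out : List (List (String × String))) : Prop := out = parse_content_into_slides_alt content
instance (content : String) (out : List (List (String × String))) : Decidable (Spec_parse_content_into_slides content out) := by unfold Spec_parse_content_into_slides; infer_instance

-- ===== CLAIM (what is proved, stated in full; the proofs are below) =====
def Claim_equal_parse_content_into_slides : Prop := ∀ (content : String), Dom_parse_content_into_slides content → Spec_parse_content_into_slides content (parse_content_into_slides content)

-- ===== LEMMAS AND PROOFS =====

-- A's loop body after stripping/skipping empties (proof-only helper)
def pvStepA (acc : List (List (String × String)) × Option String × List String) (line : String) :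
    List (List (String × String)) × Option String × List String :=
  if pvIsTitle line then
    let slides := match acc.2.1 with
      | some t => acc.1 ++ [[("title", t), ("content", PySem.Str.join "\n" acc.2.2)]]
      | none => acc.1
    (slides, some (pvTitleOf line), [])
  else match acc.2.1 with
    | some _ => (acc.1, acc.2.1, acc.2.2 ++ [line])
    | none => acc

-- A's final flush
def pvFlush (st : List (List (String × String)) × Option String × List String) :
    List (List (String × String)) :=
  match st.2.1 with
  | some t => st.1 ++ [[("title", t), ("content", PySem.Str.join "\n" st.2.2)]]
  | none => st.1

theorem pvFold_some (ls : List String) : ∀ (slides : List (List (String × String))) (t : String) (cc : List String),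
    pvFlush (ls.foldl pvStepA (slides, some t, cc)) =
      slides ++ [("title", t), ("content", PySem.Str.join "\n" (cc ++ ls.takeWhile (fun l => !pvIsTitle l)))]
        :: pvGroup (ls.dropWhile (fun l => !pvIsTitle l)) := by
  induction ls with
  | nil => intro slides t cc; simp [pvFlush, pvGroup]
  | cons h tl ih =>
    intro slides t cc
    by_cases hh : pvIsTitle h
    · simp only [List.foldl_cons, pvStepA, hh, if_pos, List.takeWhile_cons, List.dropWhile_cons,
        Bool.not_true]
      rw [ih]
      simp [pvGroup]
    · simp only [List.foldl_cons, pvStepA, hh, if_neg, Bool.false_eq_true, not_false_iff,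
        List.takeWhile_cons, List.dropWhile_cons, Bool.not_eq_eq_eq_not, Bool.not_true]
      rw [ih]
      simp [List.append_assoc]

theorem pvFold_none (ls : List String) : ∀ (slides : List (List (String × String))) (cc : List String),
    pvFlush (ls.foldl pvStepA (slides, none, cc)) =
      slides ++ pvGroup (ls.dropWhile (fun l => !pvIsTitle l)) := by
  induction ls with
  | nil => intro slides cc; simp [pvFlush, pvGroup]
  | cons h tl ih =>
    intro slides cc
    by_cases hh : pvIsTitle h
    · simp only [List.foldl_cons, pvStepA, hh, if_pos]
      rw [pvFold_some]
      simp [pvGroup, hh]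
    · simp only [List.foldl_cons, pvStepA, hh, if_neg, Bool.false_eq_true, not_false_iff]
      rw [ih]
      simp [hh]

-- ===== VERDICT (by name: the statement is the Claim_ definition above) =====
theorem pvMain (content : String) :
    parse_content_into_slides content = parse_content_into_slides_alt content := by
  show pvFlush
      (List.foldl
        (fun (acc : List (List (String × String)) × Option String × List String) line =>
          (fun acc l => if l = "" then acc else pvStepA acc l) acc (PySem.Str.strip line))
        ([], none, []) ((PySem.Str.split? content "\n").getD [])) =
    pvGroup (List.dropWhile (fun l => !pvIsTitle l)
      ((((PySem.Str.split? content "\n").getD []).map PySem.Str.strip).filter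
        (fun l => decide (l ≠ ""))))
  rw [← List.foldl_map (f := PySem.Str.strip)
        (g := fun acc l => if l = "" then acc else pvStepA acc l)]
  rw [PySem.List.foldl_congr_mem _ _ (fun acc l => if l ≠ "" then pvStepA acc l else acc) _
        (by intro acc x _; by_cases hx : x = "" <;> simp [hx])]
  rw [PySem.List.foldl_ite_eq_foldl_filter (p := fun l => l ≠ "") pvStepA]
  exact pvFold_none _ [] []

theorem parse_content_into_slides_spec : Claim_equal_parse_content_into_slides := by
  intro content _
  exact pvMain content
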